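-- pv_equiv track=rewrite | github.com/raeez/chiral-bar-cobar | compute/lib/k3_relative_chiral.py | dmvv_product_coeffs
-- ===== SOURCE A (Python) =====
-- import math
-- from typing import Any, Dict, List, Optional, Tuple
--
-- def dmvv_product_coeffs(p_max: int = 5, q_max: int = 10) -> Dict[Tuple[int, int], int]:
--     r"""Compute the DMVV product formula coefficients.
--
--     The DMVV formula gives the generating function for Euler characteristics
--     of symmetric products of K3:
--
--       sum_{N>=0} p^N * chi(Sym^N(K3); q) = prod_{n>=1, m>=0, l in Z}
--         1/(1 - p^m q^n y^l)^{c(nm, l)}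
--
--     Setting y=1 (l-sum):
--       sum_{N>=0} p^N * chi(Sym^N(K3); q) = prod_{n>=1, m>=0}
--         1/(1 - p^m q^n)^{sum_l c(nm - l^2/4)}
--
--     But the refined version keeps y-dependence.
--
--     For the SIMPLIFIED version (y=1, extracting only p-q structure):
--     We compute:
--       prod_{k>=1} 1/(1-q^k)^{24}  [this is the N=1 sector: chi(Hilb^n(K3))]
--
--     And the multi-particle generalization:
--       chi(Sym^N(K3); q) = coefficients of p^N in the full DMVV product.
--
--     This function returns the coefficients a[N, n] where
--       sum_{N,n} a[N,n] p^N q^n = prod_{n>=1, m>=0} 1/(1-p^m q^n)^{24*delta_{m,1} + ...}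
--
--     Actually, the simplest DMVV at y=1 is:
--       sum_{N>=0} p^N * sum_n chi(Hilb^n(Sym^N(K3))) q^n
--         = prod_{n>0, m>0} 1/(1 - p^m q^n)^{c_0(mn)}
--
--     where c_0(k) = 24 * sigma_0(k) ... no, this is getting confused.
--
--     THE CORRECT DMVV (Dijkgraaf et al 1997, eq 4.17):
--       sum_{N>=0} p^N * Z(Sym^N(K3); q, y) = prod_{m>0, n>=0, l}
--         1/(1 - p^m q^n y^l)^{c(mn, l)}
--
--     where c(n, l) are the coefficients of the K3 elliptic genus:
--       phi(K3; tau, z) = 2*phi_{0,1} = sum c(n,l) q^n y^l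
--
--     At y=1: c(n, l) summed over l gives:
--       sum_l c(n, l) = 2 * phi_{0,1}(tau, 0) [coefficient of q^n]
--                     = 2 * 12 * delta_{n,0} + 0 * q + 0 * q^2 + ...
--     Wait, phi_{0,1}(tau, 0) = 12 is a CONSTANT, so its q^n coefficient is
--     12 for n=0 and 0 for n>=1.
--
--     So at y=1: sum_l c(n, l) = 24*delta_{n,0} for the K3 elliptic genus
--     (2 * phi_{0,1} convention).
--
--     This means the y=1 DMVV product simplifies to:
--       prod_{m>0} 1/(1 - p^m)^{24}  [only the n=0 terms survive!]
--       = sum_{N>=0} p_24(N) p^N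
--
--     where p_24(N) is the number of partitions of N into 24-colored parts.
--     But this gives chi(Sym^N(K3)) as a SINGLE NUMBER (independent of q),
--     which equals the Euler characteristic chi(Hilb^N(K3)) = p_24(N).
--
--     So the INTERESTING structure of the DMVV is in the y-dependent version.
--     The y=1 specialization is just the Hilbert scheme partition function.
--
--     For the REFINED version, we compute the p^N coefficient with y-dependence:
--     this requires keeping track of the l-grading.
--
--     For this module, we focus on two computable things:
--     (a) The Hilbert scheme partition function (y=1 DMVV)
--     (b) The root multiplicities matching phi_{0,1}
--     """
--     result: Dict[Tuple[int, int], int] = {}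
--
--     # Hilb^N(K3) Euler characteristics: coefficient of p^N in prod(1-p^m)^{-24}
--     # This is the 24-colored partition function.
--     coeffs = [0] * (p_max + 1)
--     coeffs[0] = 1
--     for m in range(1, p_max + 1):
--         new = [0] * (p_max + 1)
--         for N in range(p_max + 1):
--             if coeffs[N] == 0:
--                 continue
--             j = 0
--             while N + j * m <= p_max:
--                 binom = math.comb(j + 23, 23)
--                 new[N + j * m] += coeffs[N] * binom
--                 j += 1
--         coeffs = new
--
--     for N in range(p_max + 1):
--         result[(N, 0)] = coeffs[N]
--
--     return result
-- ===== SOURCE B (Python) =====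
-- def dmvv_product_coeffs(p_max: int = 5, q_max: int = 10):
--     # 24-colored partition counts by multiplying in each factor 1/(1-p^m)
--     # twenty-four times with an in-place prefix pass (no binomials needed).
--     coeffs = [0] * (p_max + 1)
--     coeffs[0] = 1
--     for m in range(1, p_max + 1):
--         for _ in range(24):
--             for N in range(m, p_max + 1):
--                 coeffs[N] += coeffs[N - m]
--     return {(N, 0): c for N, c in enumerate(coeffs)}
-- ===== Notes on version B (the rewrite author's own statement) =====
-- stated objective: alternative
-- what changed: A multiplies in each factor 1/(1-p^m)^24 at once by scattering coeffs[N]*C(j+23,23) into a fresh array; B instead multiplies in the factor 1/(1-p^m) twenty-four times with an in-place forward prefix pass coeffs[N] += coeffs[N-m], so no binomial coefficients and no auxiliary array are needed.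
import Mathlib
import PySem

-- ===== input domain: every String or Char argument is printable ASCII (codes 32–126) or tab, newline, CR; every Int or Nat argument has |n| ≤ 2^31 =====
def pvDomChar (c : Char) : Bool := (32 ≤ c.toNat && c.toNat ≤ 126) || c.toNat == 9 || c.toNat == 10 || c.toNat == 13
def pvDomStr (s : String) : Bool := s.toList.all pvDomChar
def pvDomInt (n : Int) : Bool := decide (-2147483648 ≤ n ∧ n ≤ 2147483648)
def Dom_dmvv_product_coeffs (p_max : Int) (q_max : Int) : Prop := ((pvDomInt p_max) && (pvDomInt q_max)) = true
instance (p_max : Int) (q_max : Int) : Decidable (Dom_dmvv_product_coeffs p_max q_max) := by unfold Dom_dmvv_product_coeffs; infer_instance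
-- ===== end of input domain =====

-- B replaces A's per-factor binomial scatter by multiplying in each factor 1/(1-p^m)
-- twenty-four times with an in-place prefix pass (alternative algorithm, no binomials).

-- ===== PORT A =====
-- math.comb(j + 23, 23)
def pvComb (j : Nat) : Int := ((j + 23).choose 23 : Int)

-- new[p] += v
def pvAddAt (l : List Int) (p : Nat) (v : Int) : List Int := l.set p (l.getD p 0 + v)

-- A's inner `while N + j * m <= p_max` loop; with 1 ≤ m and N ≤ pmax it runs
-- exactly for j = 0, …, (pmax - N) / m  (exact: j ≤ (pmax-N)/m ↔ N + j*m ≤ pmax)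
def pvAInner (pmax m N : Nat) (cN : Int) (new : List Int) : List Int :=
  (List.range ((pmax - N) / m + 1)).foldl
    (fun acc j => pvAddAt acc (N + j * m) (cN * pvComb j)) new

-- one iteration of A's outer `for m` loop: build `new` from `coeffs`
def pvAStep (pmax m : Nat) (c : List Int) : List Int :=
  (List.range (pmax + 1)).foldl
    (fun new N => if c.getD N 0 == 0 then new else pvAInner pmax m N (c.getD N 0) new)
    (List.replicate (pmax + 1) 0)

def dmvv_product_coeffs (p_max : Int) (q_max : Int) : List (Int × Int × Int) :=
  let pmax := p_max.toNat
  let c0 := (List.replicate (pmax + 1) (0 : Int)).set 0 1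
  let c := (List.range' 1 pmax).foldl (fun c m => pvAStep pmax m c) c0
  (List.range (pmax + 1)).map (fun N => (Int.ofNat N, (0 : Int), c.getD N 0))

-- ===== PORT B =====
-- B's inner `for N in range(m, p_max + 1): coeffs[N] += coeffs[N - m]`
def pvBPass (pmax m : Nat) (c : List Int) : List Int :=
  (List.range' m (pmax + 1 - m)).foldl
    (fun c N => c.set N (c.getD N 0 + c.getD (N - m) 0)) c

def dmvv_product_coeffs_alt (p_max : Int) (q_max : Int) : List (Int × Int × Int) :=
  let pmax := p_max.toNat
  let c0 := (List.replicate (pmax + 1) (0 : Int)).set 0 1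
  let c := (List.range' 1 pmax).foldl
    (fun c m => (List.range 24).foldl (fun c _ => pvBPass pmax m c) c) c0
  (List.range (pmax + 1)).map (fun N => (Int.ofNat N, (0 : Int), c.getD N 0))

-- ===== PRECONDITION & SPEC =====
-- A does `coeffs = [0]*(p_max+1); coeffs[0] = 1`, an IndexError when p_max < 0
def Pre_dmvv_product_coeffs (p_max : Int) (q_max : Int) : Prop := 0 ≤ p_max
instance (p_max : Int) (q_max : Int) : Decidable (Pre_dmvv_product_coeffs p_max q_max) := by
  unfold Pre_dmvv_product_coeffs; infer_instance

def pvWitness_dmvv_product_coeffs : Int × Int := (5, 10)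

def Spec_dmvv_product_coeffs (p_max : Int) (q_max : Int) (out : List (Int × Int × Int)) : Prop := out = dmvv_product_coeffs_alt p_max q_max
instance (p_max : Int) (q_max : Int) (out : List (Int × Int × Int)) : Decidable (Spec_dmvv_product_coeffs p_max q_max out) := by unfold Spec_dmvv_product_coeffs; infer_instance

-- ===== CLAIM (what is proved, stated in full; the proofs are below) =====
def Claim_equal_dmvv_product_coeffs : Prop := ∀ (p_max : Int) (q_max : Int), Dom_dmvv_product_coeffs p_max q_max → Pre_dmvv_product_coeffs p_max q_max → Spec_dmvv_product_coeffs p_max q_max (dmvv_product_coeffs p_max q_max)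

-- ===== LEMMAS AND PROOFS =====

theorem pv_getD_set (l : List Int) (p i : Nat) (v : Int) :
    (l.set p v).getD i 0 = if p = i ∧ i < l.length then v else l.getD i 0 := by
  simp only [List.getD_eq_getElem?_getD, List.getElem?_set]
  split_ifs with h1 h2 h3 h3 <;> simp_all

theorem pvAInner_fold_length (m N : Nat) (cN : Int) :
    ∀ (L : List Nat) (new : List Int),
      (L.foldl (fun acc j => pvAddAt acc (N + j * m) (cN * pvComb j)) new).length
        = new.length := by
  intro L
  induction L with
  | nil => intro new; rfl
  | cons x xs ih =>
    intro new
    simp only [List.foldl_cons]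
    rw [ih]
    simp [pvAddAt]

theorem pvAInner_length (pmax m N : Nat) (cN : Int) (new : List Int) :
    (pvAInner pmax m N cN new).length = new.length :=
  pvAInner_fold_length m N cN _ new

theorem pvAInner_aux (m N : Nat) (hm : 1 ≤ m) (cN : Int) (L : Nat) (i : Nat) :
    ∀ (cnt : Nat) (new : List Int), new.length = L →
      ((List.range cnt).foldl (fun acc j => pvAddAt acc (N + j * m) (cN * pvComb j)) new).getD i 0
        = new.getD i 0 +
          (if (∃ j, j < cnt ∧ N + j * m = i) ∧ i < L then cN * pvComb ((i - N) / m) else 0) := by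
  intro cnt
  induction cnt with
  | zero => intro new hlen; simp
  | succ cnt ih =>
    intro new hlen
    rw [List.range_succ, List.foldl_append, List.foldl_cons, List.foldl_nil]
    have hrlen : ((List.range cnt).foldl (fun acc j => pvAddAt acc (N + j * m) (cN * pvComb j)) new).length = L :=
      (pvAInner_fold_length m N cN _ new).trans hlen
    have hri := ih new hlen
    generalize hr : (List.range cnt).foldl (fun acc j => pvAddAt acc (N + j * m) (cN * pvComb j)) new = r at hri hrlen ⊢
    show (pvAddAt r (N + cnt * m) (cN * pvComb cnt)).getD i 0 = _
    rw [pvAddAt, pv_getD_set, hrlen]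
    by_cases hc : N + cnt * m = i ∧ i < L
    · obtain ⟨hpi, hiL⟩ := hc
      rw [if_pos ⟨hpi, hiL⟩, hpi]
      have hex : ¬ ((∃ j, j < cnt ∧ N + j * m = i) ∧ i < L) := by
        rintro ⟨⟨j, hj, hji⟩, -⟩
        have h1 : j * m = cnt * m := by omega
        have : j = cnt := Nat.eq_of_mul_eq_mul_right (by omega) h1
        omega
      rw [hri, if_neg hex, add_zero]
      have hdiv : (i - N) / m = cnt := by
        have h2 : i - N = cnt * m := by omega
        rw [h2, Nat.mul_div_cancel _ (by omega)]
      rw [if_pos ⟨⟨cnt, by omega, hpi⟩, hiL⟩, hdiv]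
    · rw [if_neg hc, hri]
      congr 1
      have : ((∃ j, j < cnt ∧ N + j * m = i) ∧ i < L) ↔
          ((∃ j, j < cnt + 1 ∧ N + j * m = i) ∧ i < L) := by
        constructor
        · rintro ⟨⟨j, hj, hji⟩, hL⟩; exact ⟨⟨j, by omega, hji⟩, hL⟩
        · rintro ⟨⟨j, hj, hji⟩, hL⟩
          refine ⟨⟨j, ?_, hji⟩, hL⟩
          rcases Nat.lt_succ_iff_lt_or_eq.mp hj with h | h
          · exact h
          · exact absurd hji (by rw [h]; exact fun he => hc ⟨he, hL⟩)
      rw [if_congr this rfl rfl]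

theorem pvAInner_getD (pmax m N : Nat) (hm : 1 ≤ m) (hN : N ≤ pmax) (cN : Int)
    (new : List Int) (hlen : new.length = pmax + 1) (i : Nat) :
    (pvAInner pmax m N cN new).getD i 0 =
      new.getD i 0 +
        (if N ≤ i ∧ i ≤ pmax ∧ m ∣ (i - N) then cN * pvComb ((i - N) / m) else 0) := by
  rw [pvAInner, pvAInner_aux m N hm cN (pmax + 1) i _ new hlen]
  congr 1
  have : ((∃ j, j < (pmax - N) / m + 1 ∧ N + j * m = i) ∧ i < pmax + 1) ↔
      (N ≤ i ∧ i ≤ pmax ∧ m ∣ (i - N)) := by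
    constructor
    · rintro ⟨⟨j, hj, hji⟩, hL⟩
      refine ⟨by omega, by omega, ⟨j, ?_⟩⟩
      rw [mul_comm]; omega
    · rintro ⟨h1, h2, d, hd⟩
      have hd' : d * m = i - N := by rw [mul_comm]; omega
      have hdm : d * m ≤ pmax - N := by omega
      have hdd : d ≤ (pmax - N) / m := (Nat.le_div_iff_mul_le (by omega)).mpr hdm
      exact ⟨⟨d, by omega, by omega⟩, by omega⟩
  rw [if_congr this rfl rfl]

theorem pv_getD_of_le (l : List Int) (i : Nat) (h : l.length ≤ i) : l.getD i 0 = 0 := by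
  simp [List.getD_eq_getElem?_getD, List.getElem?_eq_none h]

theorem pvAStep_fold_length (pmax m : Nat) (c : List Int) :
    ∀ (L : List Nat) (new : List Int),
      (L.foldl (fun new N => if c.getD N 0 == 0 then new else pvAInner pmax m N (c.getD N 0) new) new).length
        = new.length := by
  intro L
  induction L with
  | nil => intro new; rfl
  | cons x xs ih =>
    intro new
    simp only [List.foldl_cons]
    rw [ih]
    by_cases h : c.getD x 0 == 0
    · rw [if_pos h]
    · rw [if_neg h, pvAInner_length]

theorem pvAStep_length (pmax m : Nat) (c : List Int) :
    (pvAStep pmax m c).length = pmax + 1 := by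
  rw [pvAStep, pvAStep_fold_length, List.length_replicate]

theorem pvAStep_aux (pmax m : Nat) (hm : 1 ≤ m) (c : List Int) (i : Nat) (hi : i ≤ pmax) :
    ∀ (t : Nat), t ≤ pmax + 1 → ∀ (new : List Int), new.length = pmax + 1 →
      ((List.range t).foldl (fun new N => if c.getD N 0 == 0 then new else pvAInner pmax m N (c.getD N 0) new) new).getD i 0
        = new.getD i 0 + ∑ N ∈ Finset.range t,
            (if N ≤ i ∧ m ∣ (i - N) then c.getD N 0 * pvComb ((i - N) / m) else 0) := by
  intro t
  induction t with
  | zero => intro _ new _; simp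
  | succ t ih =>
    intro ht new hlen
    rw [List.range_succ, List.foldl_append, List.foldl_cons, List.foldl_nil,
      Finset.sum_range_succ]
    have hrlen := (pvAStep_fold_length pmax m c (List.range t) new).trans hlen
    have hri := ih (by omega) new hlen
    generalize hr : (List.range t).foldl (fun new N => if c.getD N 0 == 0 then new else pvAInner pmax m N (c.getD N 0) new) new = r at hri hrlen ⊢
    by_cases h0 : c.getD t 0 == 0
    · rw [if_pos h0, hri]
      have : (if t ≤ i ∧ m ∣ (i - t) then c.getD t 0 * pvComb ((i - t) / m) else 0) = 0 := by
        have hz : c.getD t 0 = 0 := by simpa using h0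
        rw [hz]; split_ifs <;> ring
      rw [this, add_zero]
    · rw [if_neg h0, pvAInner_getD pmax m t hm (by omega) _ r hrlen i, hri]
      have : (if t ≤ i ∧ i ≤ pmax ∧ m ∣ (i - t) then c.getD t 0 * pvComb ((i - t) / m) else 0)
          = (if t ≤ i ∧ m ∣ (i - t) then c.getD t 0 * pvComb ((i - t) / m) else 0) := by
        apply if_congr _ rfl rfl
        constructor
        · rintro ⟨a, -, b⟩; exact ⟨a, b⟩
        · rintro ⟨a, b⟩; exact ⟨a, hi, b⟩
      rw [this, add_assoc]

theorem pvAStep_getD (pmax m : Nat) (hm : 1 ≤ m) (c : List Int)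
    (hlen : c.length = pmax + 1) (i : Nat) (hi : i ≤ pmax) :
    (pvAStep pmax m c).getD i 0 =
      ∑ N ∈ Finset.range (pmax + 1),
        (if N ≤ i ∧ m ∣ (i - N) then c.getD N 0 * pvComb ((i - N) / m) else 0) := by
  rw [pvAStep, pvAStep_aux pmax m hm c i hi (pmax + 1) (le_refl _) _ (by simp)]
  simp [List.getD_eq_getElem?_getD]

theorem pv_sum_dvd_reindex (f : Nat → Int) (i m : Nat) (hm : 1 ≤ m) :
    (∑ N ∈ Finset.range (i + 1), (if m ∣ (i - N) then f N else 0)) =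
      ∑ j ∈ Finset.range (i / m + 1), f (i - j * m) := by
  rw [← Finset.sum_filter]
  apply Finset.sum_nbij' (fun N => (i - N) / m) (fun j => i - j * m)
  · intro N hN
    simp only [Finset.mem_filter, Finset.mem_range] at hN
    simp only [Finset.mem_range]
    have := Nat.div_le_div_right (c := m) (Nat.sub_le i N)
    omega
  · intro j hj
    simp only [Finset.mem_range] at hj
    have hjm : j * m ≤ i := (Nat.le_div_iff_mul_le (by omega)).mp (by omega)
    simp only [Finset.mem_filter, Finset.mem_range]
    refine ⟨by omega, ⟨j, ?_⟩⟩
    have h1 : i - (i - j * m) = j * m := by omega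
    rw [h1, mul_comm]
  · intro N hN
    simp only [Finset.mem_filter, Finset.mem_range] at hN
    obtain ⟨hNlt, d, hd⟩ := hN
    have h1 : (i - N) / m * m = i - N := by
      rw [hd, Nat.mul_div_cancel_left _ (by omega), mul_comm]
    rw [h1]; omega
  · intro j hj
    simp only [Finset.mem_range] at hj
    have hjm : j * m ≤ i := (Nat.le_div_iff_mul_le (by omega)).mp (by omega)
    have h1 : i - (i - j * m) = j * m := by omega
    rw [h1, Nat.mul_div_cancel _ (by omega)]
  · intro N hN
    simp only [Finset.mem_filter, Finset.mem_range] at hN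
    obtain ⟨hNlt, d, hd⟩ := hN
    have h1 : (i - N) / m * m = i - N := by
      rw [hd, Nat.mul_div_cancel_left _ (by omega), mul_comm]
    rw [h1]
    congr 1
    omega

theorem pvAStep_closed (pmax m : Nat) (hm : 1 ≤ m) (c : List Int)
    (hlen : c.length = pmax + 1) (i : Nat) (hi : i ≤ pmax) :
    (pvAStep pmax m c).getD i 0 =
      ∑ j ∈ Finset.range (i / m + 1), pvComb j * c.getD (i - j * m) 0 := by
  rw [pvAStep_getD pmax m hm c hlen i hi]
  have hshrink : ∑ N ∈ Finset.range (pmax + 1),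
        (if N ≤ i ∧ m ∣ (i - N) then c.getD N 0 * pvComb ((i - N) / m) else 0)
      = ∑ N ∈ Finset.range (i + 1),
        (if m ∣ (i - N) then c.getD N 0 * pvComb ((i - N) / m) else 0) := by
    have hsub : Finset.range (i + 1) ⊆ Finset.range (pmax + 1) := by
      intro x hx; simp only [Finset.mem_range] at *; omega
    have hzero : ∀ x ∈ Finset.range (pmax + 1), x ∉ Finset.range (i + 1) →
        (if x ≤ i ∧ m ∣ (i - x) then c.getD x 0 * pvComb ((i - x) / m) else 0) = 0 := by
      intro x hx hx'
      simp only [Finset.mem_range] at hx hx'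
      rw [if_neg (by omega)]
    rw [← Finset.sum_subset hsub hzero]
    apply Finset.sum_congr rfl
    intro N hN
    simp only [Finset.mem_range] at hN
    apply if_congr _ rfl rfl
    constructor
    · rintro ⟨-, b⟩; exact b
    · intro b; exact ⟨by omega, b⟩
  rw [hshrink, pv_sum_dvd_reindex (fun N => c.getD N 0 * pvComb ((i - N) / m)) i m hm]
  apply Finset.sum_congr rfl
  intro j hj
  simp only [Finset.mem_range] at hj
  have hjm : j * m ≤ i := (Nat.le_div_iff_mul_le (by omega)).mp (by omega)
  have : (i - (i - j * m)) / m = j := by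
    have h1 : i - (i - j * m) = j * m := by omega
    rw [h1, Nat.mul_div_cancel _ (by omega)]
  rw [this, mul_comm]

theorem pvBPass_aux (pmax m : Nat) (hm : 1 ≤ m) (c : List Int) (hlen : c.length = pmax + 1) :
    ∀ (k : Nat), m + k ≤ pmax + 1 →
      (((List.range' m k).foldl (fun c N => c.set N (c.getD N 0 + c.getD (N - m) 0)) c).length = pmax + 1)
      ∧ ∀ i,
        (i < m + k →
          ((List.range' m k).foldl (fun c N => c.set N (c.getD N 0 + c.getD (N - m) 0)) c).getD i 0
            = ∑ j ∈ Finset.range (i / m + 1), c.getD (i - j * m) 0)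
        ∧ (m + k ≤ i →
          ((List.range' m k).foldl (fun c N => c.set N (c.getD N 0 + c.getD (N - m) 0)) c).getD i 0
            = c.getD i 0) := by
  intro k
  induction k with
  | zero =>
    intro hk
    refine ⟨hlen, fun i => ⟨fun hi => ?_, fun _ => rfl⟩⟩
    have h0 : i / m = 0 := Nat.div_eq_of_lt (by omega)
    simp [h0]
  | succ k ih =>
    intro hk
    obtain ⟨ihlen, ihgd⟩ := ih (by omega)
    rw [List.range'_1_concat, List.foldl_append, List.foldl_cons, List.foldl_nil]
    generalize hr : (List.range' m k).foldl (fun c N => c.set N (c.getD N 0 + c.getD (N - m) 0)) c = r at ihlen ihgd ⊢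
    have hrt : r.getD (m + k) 0 = c.getD (m + k) 0 := (ihgd (m + k)).2 (le_refl _)
    have hrk : r.getD (m + k - m) 0 = ∑ j ∈ Finset.range (k / m + 1), c.getD (k - j * m) 0 := by
      have : m + k - m = k := by omega
      rw [this]
      exact (ihgd k).1 (by omega)
    constructor
    · rw [List.length_set, ihlen]
    · intro i
      rw [pv_getD_set, ihlen]
      constructor
      · intro hi
        by_cases hit : m + k = i
        · have hdiv : (m + k) / m = k / m + 1 := by
            rw [add_comm m k, Nat.add_div_right _ (by omega)]
          rw [if_pos ⟨hit, by omega⟩, hrt, hrk, ← hit, hdiv]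
          conv_rhs => rw [Finset.sum_range_succ']
          have hcg : ∀ j' ∈ Finset.range (k / m + 1),
              c.getD (m + k - (j' + 1) * m) 0 = c.getD (k - j' * m) 0 := by
            intro j' _
            congr 1
            have h2 : (j' + 1) * m = j' * m + m := by ring
            omega
          rw [Finset.sum_congr rfl hcg, Nat.zero_mul, Nat.sub_zero, add_comm]
        · rw [if_neg (by intro h; exact hit h.1)]
          exact (ihgd i).1 (by omega)
      · intro hi
        rw [if_neg (by omega), (ihgd i).2 (by omega)]

theorem pvBPass_length (pmax m : Nat) (c : List Int) :
    (pvBPass pmax m c).length = c.length := by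
  rw [pvBPass]
  generalize List.range' m (pmax + 1 - m) = L
  induction L generalizing c with
  | nil => rfl
  | cons x xs ih => simp only [List.foldl_cons]; rw [ih]; simp

theorem pvBPass_getD (pmax m : Nat) (hm : 1 ≤ m) (hmp : m ≤ pmax + 1) (c : List Int)
    (hlen : c.length = pmax + 1) (i : Nat) (hi : i ≤ pmax) :
    (pvBPass pmax m c).getD i 0 = ∑ j ∈ Finset.range (i / m + 1), c.getD (i - j * m) 0 := by
  have := (pvBPass_aux pmax m hm c hlen (pmax + 1 - m) (by omega)).2 i
  exact this.1 (by omega)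

theorem pv_sum_triangle (F : Nat → Nat → Int) (n : Nat) :
    (∑ j ∈ Finset.range n, ∑ j' ∈ Finset.range (n - j), F j j') =
      ∑ J ∈ Finset.range n, ∑ a ∈ Finset.range (J + 1), F a (J - a) := by
  induction n with
  | zero => simp
  | succ n ih =>
    rw [Finset.sum_range_succ (f := fun J => ∑ a ∈ Finset.range (J + 1), F a (J - a)), ← ih]
    have hsplit : ∀ j ∈ Finset.range (n + 1),
        (∑ j' ∈ Finset.range (n + 1 - j), F j j')
          = (∑ j' ∈ Finset.range (n - j), F j j') + F j (n - j) := by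
      intro j hj
      simp only [Finset.mem_range] at hj
      have : n + 1 - j = (n - j) + 1 := by omega
      rw [this, Finset.sum_range_succ]
    rw [Finset.sum_congr rfl hsplit, Finset.sum_add_distrib]
    congr 1
    · rw [Finset.sum_range_succ]
      have : ∑ j' ∈ Finset.range (n - n), F n j' = 0 := by simp
      rw [this, add_zero]

theorem pvBIter_getD (pmax m : Nat) (hm : 1 ≤ m) (hmp : m ≤ pmax + 1) :
    ∀ (K : Nat), 1 ≤ K → ∀ (c : List Int), c.length = pmax + 1 →
    ((List.range K).foldl (fun c _ => pvBPass pmax m c) c).length = pmax + 1 ∧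
    ∀ i ≤ pmax,
      ((List.range K).foldl (fun c _ => pvBPass pmax m c) c).getD i 0 =
        ∑ j ∈ Finset.range (i / m + 1),
          (((j + K - 1).choose (K - 1) : Int)) * c.getD (i - j * m) 0 := by
  intro K
  induction K with
  | zero => omega
  | succ K ih =>
    intro _ c hlen
    by_cases hK : K = 0
    · subst hK
      have h1 : (List.range 1).foldl (fun c _ => pvBPass pmax m c) c = pvBPass pmax m c := rfl
      rw [h1]
      refine ⟨(pvBPass_length pmax m c).trans hlen, fun i hi => ?_⟩
      rw [pvBPass_getD pmax m hm hmp c hlen i hi]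
      apply Finset.sum_congr rfl
      intro j _
      simp
    · have hK1 : 1 ≤ K := by omega
      obtain ⟨ihlen, ihgd⟩ := ih hK1 c hlen
      rw [List.range_succ, List.foldl_append, List.foldl_cons, List.foldl_nil]
      generalize hrw : (List.range K).foldl (fun c _ => pvBPass pmax m c) c = r at ihlen ihgd ⊢
      refine ⟨(pvBPass_length pmax m r).trans ihlen, fun i hi => ?_⟩
      rw [pvBPass_getD pmax m hm hmp r ihlen i hi]
      have hterm : ∀ j ∈ Finset.range (i / m + 1),
          r.getD (i - j * m) 0 =
            ∑ j' ∈ Finset.range (i / m + 1 - j),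
              (((j' + K - 1).choose (K - 1) : Int)) * c.getD (i - j * m - j' * m) 0 := by
        intro j hj
        simp only [Finset.mem_range] at hj
        have hjm : j * m ≤ i := (Nat.le_div_iff_mul_le (by omega)).mp (by omega)
        have hd : (i - j * m) / m = i / m - j := by
          rw [mul_comm j m, Nat.sub_mul_div]
        have hd2 : (i - j * m) / m + 1 = i / m + 1 - j := by omega
        rw [ihgd (i - j * m) (by omega), hd2]
      rw [Finset.sum_congr rfl hterm,
        pv_sum_triangle (fun j j' => (((j' + K - 1).choose (K - 1) : Int)) * c.getD (i - j * m - j' * m) 0) (i / m + 1)]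
      apply Finset.sum_congr rfl
      intro J hJ
      simp only [Finset.mem_range] at hJ
      have hJm : J * m ≤ i := (Nat.le_div_iff_mul_le (by omega)).mp (by omega)
      have hsub : ∀ a ∈ Finset.range (J + 1),
          (((J - a + K - 1).choose (K - 1) : Int)) * c.getD (i - a * m - (J - a) * m) 0
            = (((J - a + K - 1).choose (K - 1) : Int)) * c.getD (i - J * m) 0 := by
        intro a ha
        simp only [Finset.mem_range] at ha
        congr 2
        have h1 : a * m + (J - a) * m = J * m := by
          rw [← Nat.add_mul]
          congr 1
          omega
        omega
      rw [Finset.sum_congr rfl hsub, ← Finset.sum_mul]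
      congr 1
      have hrefl : ∑ a ∈ Finset.range (J + 1), (((J - a + K - 1).choose (K - 1) : Int))
          = ∑ a ∈ Finset.range (J + 1), (((a + (K - 1)).choose (K - 1) : Int)) := by
        rw [← Finset.sum_range_reflect]
        apply Finset.sum_congr rfl
        intro a ha
        simp only [Finset.mem_range] at ha
        congr 2
        omega
      rw [hrefl]
      have hhs : ∑ a ∈ Finset.range (J + 1), ((a + (K - 1)).choose (K - 1)) = (J + (K - 1) + 1).choose ((K - 1) + 1) :=
        Nat.sum_range_add_choose J (K - 1)
      have : ∑ a ∈ Finset.range (J + 1), (((a + (K - 1)).choose (K - 1) : Int))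
          = (((J + (K - 1) + 1).choose ((K - 1) + 1) : Int)) := by
        rw [← Nat.cast_sum, hhs]
      rw [this]
      congr 2 <;> omega

theorem pv_steps_agree (pmax m : Nat) (hm : 1 ≤ m) (hmp : m ≤ pmax + 1) (cA cB : List Int)
    (hA : cA.length = pmax + 1) (hB : cB.length = pmax + 1)
    (h : ∀ i, cA.getD i 0 = cB.getD i 0) :
    ∀ i, (pvAStep pmax m cA).getD i 0 =
      ((List.range 24).foldl (fun c _ => pvBPass pmax m c) cB).getD i 0 := by
  intro i
  by_cases hi : i ≤ pmax
  · rw [pvAStep_closed pmax m hm cA hA i hi,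
      (pvBIter_getD pmax m hm hmp 24 (by omega) cB hB).2 i hi]
    apply Finset.sum_congr rfl
    intro j _
    rw [h (i - j * m)]
    rfl
  · rw [pv_getD_of_le _ i (by rw [pvAStep_length]; omega),
      pv_getD_of_le _ i (by rw [(pvBIter_getD pmax m hm hmp 24 (by omega) cB hB).1]; omega)]

theorem pv_fold_agree (n : Nat) :
    ∀ (L : List Nat), (∀ m ∈ L, 1 ≤ m ∧ m ≤ n) →
    ∀ (cA cB : List Int), cA.length = n + 1 → cB.length = n + 1 →
      (∀ i, cA.getD i 0 = cB.getD i 0) →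
      (L.foldl (fun c m => pvAStep n m c) cA).length = n + 1 ∧
      (L.foldl (fun c m => (List.range 24).foldl (fun c _ => pvBPass n m c) c) cB).length = n + 1 ∧
      ∀ i, (L.foldl (fun c m => pvAStep n m c) cA).getD i 0
            = (L.foldl (fun c m => (List.range 24).foldl (fun c _ => pvBPass n m c) c) cB).getD i 0 := by
  intro L
  induction L with
  | nil => exact fun _ cA cB hA hB h => ⟨hA, hB, h⟩
  | cons m ms ih =>
    intro hL cA cB hA hB h
    simp only [List.foldl_cons]
    obtain ⟨hm1, hm2⟩ := hL m (by simp)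
    exact ih (fun x hx => hL x (by simp [hx])) _ _
      (pvAStep_length n m cA)
      ((pvBIter_getD n m hm1 (by omega) 24 (by omega) cB hB).1)
      (pv_steps_agree n m hm1 (by omega) cA cB hA hB h)

theorem pv_main (p_max q_max : Int) :
    dmvv_product_coeffs p_max q_max = dmvv_product_coeffs_alt p_max q_max := by
  rw [dmvv_product_coeffs, dmvv_product_coeffs_alt]
  apply List.map_congr_left
  intro N _
  have hmem : ∀ m ∈ List.range' 1 p_max.toNat, 1 ≤ m ∧ m ≤ p_max.toNat := by
    intro m hm
    rw [List.mem_range'_1] at hm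
    omega
  have := (pv_fold_agree p_max.toNat (List.range' 1 p_max.toNat) hmem
    ((List.replicate (p_max.toNat + 1) (0 : Int)).set 0 1)
    ((List.replicate (p_max.toNat + 1) (0 : Int)).set 0 1)
    (by simp) (by simp) (fun _ => rfl)).2.2 N
  rw [this]

-- ===== VERDICT (by name: the statement is the Claim_ definition above) =====
theorem dmvv_product_coeffs_spec : Claim_equal_dmvv_product_coeffs := by
  intro p_max q_max _ _
  unfold Spec_dmvv_product_coeffs
  exact pv_main p_max q_max
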